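-- pv_equiv track=rewrite | github.com/jontk/opnsense-cli | generate/parser/endpoint_resolver.py | _parse_crud
-- ===== SOURCE A (Python) =====
-- _CRUD_PREFIXES = ("add_", "set_", "get_", "del_", "search_", "toggle_")
--
-- def _parse_crud(command: str) -> tuple[str, str]:
--     """Parse a command like 'add_item' into ('add', 'item').
--
--     Returns ('', '') if the command doesn't match a CRUD pattern.
--     """
--     for prefix in _CRUD_PREFIXES:
--         if command.startswith(prefix):
--             verb = prefix.rstrip("_")
--             suffix = command[len(prefix):]
--             if suffix:
--                 return verb, suffix
--     return "", ""
-- ===== SOURCE B (Python) =====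
-- _CRUD_VERBS = frozenset({"add", "set", "get", "del", "search", "toggle"})
--
-- def _parse_crud(command: str) -> tuple[str, str]:
--     """Parse a command like 'add_item' into ('add', 'item').
--
--     Returns ('', '') if the command doesn't match a CRUD pattern.
--     """
--     parts = command.split("_", 1)
--     if len(parts) == 2:
--         verb, suffix = parts
--         if verb in _CRUD_VERBS and suffix:
--             return verb, suffix
--     return "", ""
-- ===== Notes on version B (the rewrite author's own statement) =====
-- stated objective: idiomatic
-- what changed: Replaces the loop that tests each of six literal prefixes (startswith + rstrip + slice per prefix) by a single split('_', 1) whose head is looked up in a frozenset of verbs.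
import Mathlib
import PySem

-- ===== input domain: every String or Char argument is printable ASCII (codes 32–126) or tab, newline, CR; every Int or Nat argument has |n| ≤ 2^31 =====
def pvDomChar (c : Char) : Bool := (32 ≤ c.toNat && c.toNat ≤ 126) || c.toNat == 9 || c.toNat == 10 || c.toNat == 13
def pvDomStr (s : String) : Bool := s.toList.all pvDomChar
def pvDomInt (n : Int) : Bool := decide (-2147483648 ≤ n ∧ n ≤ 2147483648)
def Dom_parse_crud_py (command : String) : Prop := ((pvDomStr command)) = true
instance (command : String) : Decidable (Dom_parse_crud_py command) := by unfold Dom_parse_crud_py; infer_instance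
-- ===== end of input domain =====

-- B replaces A's six-prefix startswith scan by one split('_', 1) plus a frozenset verb lookup (idiomatic; same cost).

-- ===== PORT A =====
-- hand port of str.rstrip(chars) (PySem has no chars-argument rstrip): drop trailing
-- characters belonging to the strip set; exact for every string
def pyRstripChars (s : String) (chars : String) : String :=
  String.ofList (s.toList.reverse.dropWhile (fun c => chars.toList.contains c)).reverse

def pvCrudPrefixes : List String := ["add_", "set_", "get_", "del_", "search_", "toggle_"]

def parse_crud_go (command : String) : List String → String × String
  | [] => ("", "")
  | p :: rest =>
    if PySem.Str.startswith command p then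
      let verb := pyRstripChars p "_"
      let suffix := PySem.Str.slice command (some (PySem.Str.len p)) none
      if suffix ≠ "" then (verb, suffix) else parse_crud_go command rest
    else parse_crud_go command rest

def parse_crud_py (command : String) : String × String :=
  parse_crud_go command pvCrudPrefixes

-- ===== PORT B =====
def pvCrudVerbs : PySem.Set String :=
  PySem.Set.ofList ["add", "set", "get", "del", "search", "toggle"]

def parse_crud_py_alt (command : String) : String × String :=
  match PySem.Str.splitMax? command "_" 1 with
  | some [verb, suffix] =>
      if pvCrudVerbs.contains verb && suffix ≠ "" then (verb, suffix) else ("", "")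
  | _ => ("", "")

-- ===== PRECONDITION & SPEC =====
def Spec_parse_crud_py (command : String) (out : String × String) : Prop := out = parse_crud_py_alt command
instance (command : String) (out : String × String) : Decidable (Spec_parse_crud_py command out) := by unfold Spec_parse_crud_py; infer_instance

-- ===== CLAIM (what is proved, stated in full; the proofs are below) =====
def Claim_equal_parse_crud_py : Prop := ∀ (command : String), Dom_parse_crud_py command → Spec_parse_crud_py command (parse_crud_py command)

-- ===== LEMMAS AND PROOFS =====

-- splitOnMax.go with maxsplit already exhausted just emits the remainder
theorem pv_go_zero (fuel : Nat) (l : List Char) (acc : List (List Char)) :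
    PySem.Chars.splitOnMax.go ['_'] fuel 0 l [] acc = (l :: acc).reverse := by
  cases fuel with
  | zero => simp [PySem.Chars.splitOnMax.go]
  | succ n => cases l <;> simp [PySem.Chars.splitOnMax.go]

-- characterization of splitOnMax.go for sep = "_" and one remaining split
theorem pv_go_one (fuel : Nat) (l cur : List Char) (acc : List (List Char))
    (h : l.length < fuel) :
    PySem.Chars.splitOnMax.go ['_'] fuel 1 l cur acc =
      (if '_' ∈ l
        then (l.dropWhile (· ≠ '_')).tail :: (cur.reverse ++ l.takeWhile (· ≠ '_')) :: acc
        else (cur.reverse ++ l) :: acc).reverse := by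
  induction fuel generalizing l cur acc with
  | zero => omega
  | succ n ih =>
    cases l with
    | nil => simp [PySem.Chars.splitOnMax.go]
    | cons c rest =>
      by_cases hc : c = '_'
      · subst hc
        simp [PySem.Chars.splitOnMax.go, List.isPrefixOf, pv_go_zero, List.dropWhile, List.takeWhile]
      · have hpre : List.isPrefixOf ['_'] (c :: rest) = false := by
          simp [List.isPrefixOf]; intro h; exact absurd h.symm hc
        simp only [PySem.Chars.splitOnMax.go, if_neg (by omega : ¬ (1 : Nat) = 0), hpre,
          Bool.false_eq_true, if_false]
        rw [ih rest (c :: cur) acc (by simpa using Nat.lt_of_succ_lt_succ h)]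
        simp [List.dropWhile, List.takeWhile, hc]
        rw [if_congr (or_iff_right (fun h => hc h.symm)) rfl rfl]

-- splitMax? with sep "_" and maxsplit 1, on the character level
theorem pv_split_char (cs : List Char) :
    PySem.Chars.splitMax? cs ['_'] 1 =
      some (if '_' ∈ cs
        then [cs.takeWhile (· ≠ '_'), (cs.dropWhile (· ≠ '_')).tail]
        else [cs]) := by
  simp only [PySem.Chars.splitMax?, PySem.Chars.splitOnMax]
  norm_num
  rw [pv_go_one (cs.length + 1) cs [] [] (by omega)]
  split_ifs <;> simp

-- a prefix "v_" with '_' ∉ v is a prefix of  before ++ '_' :: after  (with '_' ∉ before)  iff  before = v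
theorem pv_prefix_iff (v before after : List Char) (hv : '_' ∉ v) (hb : '_' ∉ before) :
    (v ++ ['_']) <+: (before ++ '_' :: after) ↔ before = v := by
  induction v generalizing before with
  | nil =>
    cases before with
    | nil => simp
    | cons b bs =>
      have hbb : ¬ ('_' = b) := fun h => hb (h.symm ▸ List.mem_cons_self)
      simp [List.cons_prefix_cons, hbb]
  | cons x v' ih =>
    have hxv : x ≠ '_' := fun h => hv (h ▸ List.mem_cons_self)
    have hv' : '_' ∉ v' := fun h => hv (List.mem_cons_of_mem _ h)
    cases before with
    | nil => simp [List.cons_prefix_cons, hxv]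
    | cons b bs =>
      have hbs : '_' ∉ bs := fun h => hb (List.mem_cons_of_mem _ h)
      simp only [List.cons_append, List.cons_prefix_cons, ih bs hv' hbs, List.cons.injEq]
      constructor
      · rintro ⟨h1, h2⟩; exact ⟨h1.symm, h2⟩
      · rintro ⟨h1, h2⟩; exact ⟨h1.symm, h2⟩

-- startswith against a prefix "v_" decides whether the part before the first '_' equals v
theorem pv_sw (command : String) (v before after : List Char)
    (hcs : command.toList = before ++ '_' :: after) (hb : '_' ∉ before) (hv : '_' ∉ v) :
    PySem.Str.startswith command (String.ofList (v ++ ['_'])) = decide (before = v) := by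
  have h := pv_prefix_iff v before after hv hb
  rw [← hcs, ← PySem.Chars.startswith_iff] at h
  rw [PySem.Str.startswith, String.toList_ofList]
  by_cases hbv : before = v
  · simp [h.mpr hbv, hbv]
  · simp only [hbv, decide_false]
    by_contra hcon
    simp only [Bool.not_eq_false] at hcon
    exact hbv (h.mp hcon)

-- the sliced suffix command[len(prefix):]
theorem pv_suffix (s : String) (pre after : List Char) (hcs : s.toList = pre ++ after) :
    PySem.Str.slice s (some ((pre.length : Nat) : Int)) none = String.ofList after := by
  have h : (PySem.Str.slice s (some ((pre.length : Nat) : Int)) none).toList = after := by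
    rw [PySem.Str.toList_slice, PySem.Chars.slice, PySem.List.slice_from_natCast, hcs,
      List.drop_left]
  rw [← String.ofList_toList (s := PySem.Str.slice s (some ((pre.length : Nat) : Int)) none), h]

theorem pv_ofList_eq (l : List Char) (s : String) : String.ofList l = s ↔ l = s.toList :=
  ⟨fun h => by rw [← h, String.toList_ofList], fun h => by rw [h, String.ofList_toList]⟩

-- evaluation of B when the command contains no '_'
theorem pv_alt_no (command : String) (h : '_' ∉ command.toList) :
    parse_crud_py_alt command = ("", "") := by
  unfold parse_crud_py_alt PySem.Str.splitMax?
  rw [show ("_" : String).toList = ['_'] from rfl, pv_split_char, if_neg h]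
  rfl

-- evaluation of B when the command contains a '_'
theorem pv_alt_yes (command : String) (h : '_' ∈ command.toList) :
    parse_crud_py_alt command =
      (if pvCrudVerbs.contains (String.ofList (command.toList.takeWhile (· ≠ '_'))) &&
          String.ofList ((command.toList.dropWhile (· ≠ '_')).tail) ≠ "" then
        (String.ofList (command.toList.takeWhile (· ≠ '_')),
         String.ofList ((command.toList.dropWhile (· ≠ '_')).tail))
      else ("", "")) := by
  unfold parse_crud_py_alt PySem.Str.splitMax?
  rw [show ("_" : String).toList = ['_'] from rfl, pv_split_char, if_pos h]
  rfl

-- evaluation of A when the command contains no '_'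
theorem pv_a_no (command : String) (h : '_' ∉ command.toList) :
    parse_crud_py command = ("", "") := by
  have key : ∀ p : String, '_' ∈ p.toList → PySem.Str.startswith command p = false := by
    intro p hp
    rw [PySem.Str.startswith]
    by_contra hcon
    simp only [Bool.not_eq_false] at hcon
    have hsub := ((PySem.Chars.startswith_iff _ _).mp hcon).subset
    exact h (hsub hp)
  unfold parse_crud_py pvCrudPrefixes
  simp only [parse_crud_go,
    key "add_" (by decide), key "set_" (by decide), key "get_" (by decide),
    key "del_" (by decide), key "search_" (by decide), key "toggle_" (by decide),
    Bool.false_eq_true, if_false]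

-- A's hit branch for a matched prefix, with the slice rewritten to the tail after the '_'
theorem pv_hit (command p : String) (before after : List Char)
    (hcs : command.toList = before ++ '_' :: after)
    (hp : p.toList = before ++ ['_']) (X : String × String) :
    (if PySem.Str.slice command (some (PySem.Str.len p)) none ≠ "" then
       (pyRstripChars p "_", PySem.Str.slice command (some (PySem.Str.len p)) none)
     else X)
    = (if String.ofList after ≠ "" then (pyRstripChars p "_", String.ofList after) else X) := by
  have hsub : command.toList = p.toList ++ after := by
    rw [hp, List.append_assoc, List.singleton_append, hcs]
  have hs := pv_suffix command p.toList after hsub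
  rw [show PySem.Str.len p = ((p.toList.length : Nat) : Int) from rfl, hs]

-- the first '_' splits the list into the part before it and the tail after it
theorem pv_split_exists (cs : List Char) (h : '_' ∈ cs) :
    cs.takeWhile (· ≠ '_') ++ '_' :: (cs.dropWhile (· ≠ '_')).tail = cs := by
  induction cs with
  | nil => cases h
  | cons c rest ih =>
    by_cases hc : c = '_'
    · subst hc
      rw [List.takeWhile_cons_of_neg (by simp), List.dropWhile_cons_of_neg (by simp)]
      simp
    · have hr : '_' ∈ rest := by
        rcases List.mem_cons.mp h with h' | h'
        · exact absurd h'.symm hc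
        · exact h'
      rw [List.takeWhile_cons_of_pos (by simp [hc]), List.dropWhile_cons_of_pos (by simp [hc]),
        List.cons_append, ih hr]

theorem parse_crud_eq (command : String) :
    parse_crud_py command = parse_crud_py_alt command := by
  by_cases h : '_' ∈ command.toList
  · -- split the command at the first underscore, then generalize the two pieces
    have hcs : command.toList =
        command.toList.takeWhile (· ≠ '_') ++ '_' :: (command.toList.dropWhile (· ≠ '_')).tail :=
      (pv_split_exists command.toList h).symm
    have hb : '_' ∉ command.toList.takeWhile (· ≠ '_') := by
      intro hmem
      have := List.mem_takeWhile_imp hmem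
      simp at this
    rw [pv_alt_yes command h]
    generalize hbe : command.toList.takeWhile (· ≠ '_') = before at hcs hb ⊢
    generalize hae : (command.toList.dropWhile (· ≠ '_')).tail = after at hcs ⊢
    -- the six startswith tests
    have h1 := pv_sw command "add".toList before after hcs hb (by decide)
    have h2 := pv_sw command "set".toList before after hcs hb (by decide)
    have h3 := pv_sw command "get".toList before after hcs hb (by decide)
    have h4 := pv_sw command "del".toList before after hcs hb (by decide)
    have h5 := pv_sw command "search".toList before after hcs hb (by decide)
    have h6 := pv_sw command "toggle".toList before after hcs hb (by decide)
    rw [show String.ofList ("add".toList ++ ['_']) = "add_" from by decide] at h1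
    rw [show String.ofList ("set".toList ++ ['_']) = "set_" from by decide] at h2
    rw [show String.ofList ("get".toList ++ ['_']) = "get_" from by decide] at h3
    rw [show String.ofList ("del".toList ++ ['_']) = "del_" from by decide] at h4
    rw [show String.ofList ("search".toList ++ ['_']) = "search_" from by decide] at h5
    rw [show String.ofList ("toggle".toList ++ ['_']) = "toggle_" from by decide] at h6
    -- A's value
    unfold parse_crud_py pvCrudPrefixes
    simp only [parse_crud_go, h1, h2, h3, h4, h5, h6, decide_eq_true_eq]
    by_cases eadd : before = "add".toList
    · rw [if_pos eadd, pv_hit command "add_" before after hcs (by rw [eadd]; decide) _,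
        show pyRstripChars "add_" "_" = "add" from by decide,
        (pv_ofList_eq before "add").mpr eadd,
        show pvCrudVerbs.contains "add" = true from by decide, Bool.true_and]
      by_cases ha : String.ofList after = ""
      · rw [if_neg (fun hh => hh ha)]
        rw [if_neg (by rw [eadd]; decide)]
        rw [if_neg (by rw [eadd]; decide)]
        rw [if_neg (by rw [eadd]; decide)]
        rw [if_neg (by rw [eadd]; decide)]
        rw [if_neg (by rw [eadd]; decide)]
        rw [if_neg (by simp [ha])]
      · rw [if_pos ha, if_pos (by simp [ha])]
    rw [if_neg eadd]
    by_cases eset : before = "set".toList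
    · rw [if_pos eset, pv_hit command "set_" before after hcs (by rw [eset]; decide) _,
        show pyRstripChars "set_" "_" = "set" from by decide,
        (pv_ofList_eq before "set").mpr eset,
        show pvCrudVerbs.contains "set" = true from by decide, Bool.true_and]
      by_cases ha : String.ofList after = ""
      · rw [if_neg (fun hh => hh ha)]
        rw [if_neg (by rw [eset]; decide)]
        rw [if_neg (by rw [eset]; decide)]
        rw [if_neg (by rw [eset]; decide)]
        rw [if_neg (by rw [eset]; decide)]
        rw [if_neg (by simp [ha])]
      · rw [if_pos ha, if_pos (by simp [ha])]
    rw [if_neg eset]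
    by_cases eget : before = "get".toList
    · rw [if_pos eget, pv_hit command "get_" before after hcs (by rw [eget]; decide) _,
        show pyRstripChars "get_" "_" = "get" from by decide,
        (pv_ofList_eq before "get").mpr eget,
        show pvCrudVerbs.contains "get" = true from by decide, Bool.true_and]
      by_cases ha : String.ofList after = ""
      · rw [if_neg (fun hh => hh ha)]
        rw [if_neg (by rw [eget]; decide)]
        rw [if_neg (by rw [eget]; decide)]
        rw [if_neg (by rw [eget]; decide)]
        rw [if_neg (by simp [ha])]
      · rw [if_pos ha, if_pos (by simp [ha])]
    rw [if_neg eget]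
    by_cases edel : before = "del".toList
    · rw [if_pos edel, pv_hit command "del_" before after hcs (by rw [edel]; decide) _,
        show pyRstripChars "del_" "_" = "del" from by decide,
        (pv_ofList_eq before "del").mpr edel,
        show pvCrudVerbs.contains "del" = true from by decide, Bool.true_and]
      by_cases ha : String.ofList after = ""
      · rw [if_neg (fun hh => hh ha)]
        rw [if_neg (by rw [edel]; decide)]
        rw [if_neg (by rw [edel]; decide)]
        rw [if_neg (by simp [ha])]
      · rw [if_pos ha, if_pos (by simp [ha])]
    rw [if_neg edel]
    by_cases esearch : before = "search".toList
    · rw [if_pos esearch, pv_hit command "search_" before after hcs (by rw [esearch]; decide) _,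
        show pyRstripChars "search_" "_" = "search" from by decide,
        (pv_ofList_eq before "search").mpr esearch,
        show pvCrudVerbs.contains "search" = true from by decide, Bool.true_and]
      by_cases ha : String.ofList after = ""
      · rw [if_neg (fun hh => hh ha)]
        rw [if_neg (by rw [esearch]; decide)]
        rw [if_neg (by simp [ha])]
      · rw [if_pos ha, if_pos (by simp [ha])]
    rw [if_neg esearch]
    by_cases etoggle : before = "toggle".toList
    · rw [if_pos etoggle, pv_hit command "toggle_" before after hcs (by rw [etoggle]; decide) _,
        show pyRstripChars "toggle_" "_" = "toggle" from by decide,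
        (pv_ofList_eq before "toggle").mpr etoggle,
        show pvCrudVerbs.contains "toggle" = true from by decide, Bool.true_and]
      by_cases ha : String.ofList after = ""
      · rw [if_neg (fun hh => hh ha)]
        rw [if_neg (by simp [ha])]
      · rw [if_pos ha, if_pos (by simp [ha])]
    rw [if_neg etoggle]
    have hcf : pvCrudVerbs.contains (String.ofList before) = false := by
      simp only [pvCrudVerbs, PySem.Set.contains,
        show (PySem.Set.ofList ["add","set","get","del","search","toggle"] : List String) =
          ["add","set","get","del","search","toggle"] from by decide]
      simp [List.contains_eq_mem, pv_ofList_eq]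
      exact ⟨eadd, eset, eget, edel, esearch, etoggle⟩
    rw [hcf, Bool.false_and, if_neg (by simp)]
  · rw [pv_a_no command h, pv_alt_no command h]

-- ===== VERDICT (by name: the statement is the Claim_ definition above) =====
theorem parse_crud_py_spec : Claim_equal_parse_crud_py := by
  intro command _
  unfold Spec_parse_crud_py
  exact parse_crud_eq command
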